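-- pv_equiv track=rewrite | github.com/mamauch/DM17 | Uebung3/src/apriori.py | calculateKNegativeBoarder
-- ===== SOURCE A (Python) =====
-- def calculateKNegativeBoarder(currentNBoarder, currentCSet, freqSet):
--     # B-i = B-(i-1) U (Ci - Fi)
--     tmpCurrentSet = []
--     for item in currentCSet:
--         tmpCurrentSet.append(item)
--
--     for item in freqSet:
--         if item in tmpCurrentSet:
--             tmpCurrentSet.remove(item)
--     for i in tmpCurrentSet:
--         currentNBoarder.append(i)
--     return currentNBoarder
-- ===== SOURCE B (Python) =====
-- def calculateKNegativeBoarder(currentNBoarder, currentCSet, freqSet):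
--     # count how many occurrences of each itemset must be dropped, then one pass
--     skip = {}
--     for item in freqSet:
--         k = tuple(item)
--         skip[k] = skip.get(k, 0) + 1
--     for item in currentCSet:
--         k = tuple(item)
--         c = skip.get(k, 0)
--         if c > 0:
--             skip[k] = c - 1
--         else:
--             currentNBoarder.append(item)
--     return currentNBoarder
-- ===== Notes on version B (the rewrite author's own statement) =====
-- stated objective: alternative
-- what changed: Replaces A's copy-the-list / remove-first-occurrence-per-freqSet-item loops with a skip-count dict built from freqSet followed by a single count-guided pass over currentCSet that appends survivors directly.
import Mathlib
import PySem

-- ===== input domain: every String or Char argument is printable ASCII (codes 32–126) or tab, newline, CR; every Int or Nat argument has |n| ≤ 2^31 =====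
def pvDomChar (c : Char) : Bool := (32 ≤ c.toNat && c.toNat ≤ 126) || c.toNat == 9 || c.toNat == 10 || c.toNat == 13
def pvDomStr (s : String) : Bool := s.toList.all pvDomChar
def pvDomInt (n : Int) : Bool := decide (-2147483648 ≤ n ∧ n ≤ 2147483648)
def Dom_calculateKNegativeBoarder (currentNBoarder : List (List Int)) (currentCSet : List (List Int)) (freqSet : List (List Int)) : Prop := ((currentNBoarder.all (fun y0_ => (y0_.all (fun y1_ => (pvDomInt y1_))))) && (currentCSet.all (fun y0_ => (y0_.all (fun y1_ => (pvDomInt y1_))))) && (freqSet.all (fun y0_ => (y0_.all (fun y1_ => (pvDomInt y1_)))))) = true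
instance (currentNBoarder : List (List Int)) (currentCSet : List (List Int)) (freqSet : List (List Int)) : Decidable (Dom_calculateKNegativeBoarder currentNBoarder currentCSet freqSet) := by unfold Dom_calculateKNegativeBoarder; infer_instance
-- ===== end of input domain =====

-- B replaces A's copy/remove-over-freqSet/append loops by a skip-count dict and one pass over
-- currentCSet (objective: alternative single-pass algorithm). Both A and B append the surviving
-- itemsets to the currentNBoarder argument in place; the theorem is about the return value.

-- ===== PORT A =====
def calculateKNegativeBoarder (currentNBoarder : List (List Int)) (currentCSet : List (List Int)) (freqSet : List (List Int)) : List (List Int) :=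
  -- tmpCurrentSet = []; for item in currentCSet: tmpCurrentSet.append(item)
  let tmp := currentCSet.foldl (fun acc item => acc ++ [item]) []
  -- for item in freqSet: if item in tmpCurrentSet: tmpCurrentSet.remove(item)
  let tmp2 := freqSet.foldl (fun acc item =>
      if item ∈ acc then (PySem.List.remove? acc item).getD acc else acc) tmp
  -- for i in tmpCurrentSet: currentNBoarder.append(i)
  tmp2.foldl (fun nb i => nb ++ [i]) currentNBoarder

-- ===== PORT B =====
def calculateKNegativeBoarder_alt (currentNBoarder : List (List Int)) (currentCSet : List (List Int)) (freqSet : List (List Int)) : List (List Int) :=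
  -- skip = {}; for item in freqSet: skip[item] = skip.get(item, 0) + 1
  let skip : PySem.Dict (List Int) Int :=
    freqSet.foldl (fun d item => d.insert item (d.getD item 0 + 1)) PySem.Dict.empty
  -- for item in currentCSet: c = skip.get(item, 0); if c > 0: skip[item] = c - 1 else: currentNBoarder.append(item)
  (currentCSet.foldl (fun (p : List (List Int) × PySem.Dict (List Int) Int) item =>
      let c := p.2.getD item 0
      if c > 0 then (p.1, p.2.insert item (c - 1))
      else (p.1 ++ [item], p.2)) (currentNBoarder, skip)).1

-- ===== PRECONDITION & SPEC =====
def Spec_calculateKNegativeBoarder (currentNBoarder : List (List Int)) (currentCSet : List (List Int)) (freqSet : List (List Int)) (out : List (List Int)) : Prop := out = calculateKNegativeBoarder_alt currentNBoarder currentCSet freqSet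
instance (currentNBoarder : List (List Int)) (currentCSet : List (List Int)) (freqSet : List (List Int)) (out : List (List Int)) : Decidable (Spec_calculateKNegativeBoarder currentNBoarder currentCSet freqSet out) := by unfold Spec_calculateKNegativeBoarder; infer_instance

-- ===== CLAIM (what is proved, stated in full; the proofs are below) =====
def Claim_equal_calculateKNegativeBoarder : Prop := ∀ (currentNBoarder : List (List Int)) (currentCSet : List (List Int)) (freqSet : List (List Int)), Dom_calculateKNegativeBoarder currentNBoarder currentCSet freqSet → Spec_calculateKNegativeBoarder currentNBoarder currentCSet freqSet (calculateKNegativeBoarder currentNBoarder currentCSet freqSet)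

-- ===== LEMMAS AND PROOFS =====

-- the common characterisation: drop each element while its count is still positive
def pvFilterCount (l : List (List Int)) (m : List Int → Int) : List (List Int) :=
  match l with
  | [] => []
  | a :: t =>
      if m a > 0 then pvFilterCount t (fun v => if v = a then m a - 1 else m v)
      else a :: pvFilterCount t m

theorem pvFilterCount_cons (a : List Int) (t : List (List Int)) (m : List Int → Int) :
    pvFilterCount (a :: t) m
      = if m a > 0 then pvFilterCount t (fun v => if v = a then m a - 1 else m v)
        else a :: pvFilterCount t m := rfl

theorem pv_copy (l : List (List Int)) (acc : List (List Int)) :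
    l.foldl (fun a x => a ++ [x]) acc = acc ++ l := by
  induction l generalizing acc with
  | nil => simp
  | cons a t ih => simp [List.foldl, ih]

theorem pv_filterCount_zero (l : List (List Int)) : pvFilterCount l (fun _ => 0) = l := by
  induction l with
  | nil => rfl
  | cons a t ih => simp [pvFilterCount, ih]

theorem pv_filterCount_erase (l : List (List Int)) (v : List Int) (m : List Int → Int)
    (hm : 0 ≤ m v) :
    pvFilterCount (l.erase v) m = pvFilterCount l (fun w => if w = v then m v + 1 else m w) := by
  induction l generalizing m with
  | nil => rfl
  | cons a t ih =>
    by_cases hav : a = v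
    · subst hav
      rw [List.erase_cons_head, pvFilterCount_cons]
      have h1 : (if a = a then m a + 1 else m a) > 0 := by simp; omega
      rw [if_pos h1]
      congr 1
      funext w
      by_cases hw : w = a <;> simp [hw]
    · rw [List.erase_cons_tail (by simp [hav])]
      rw [pvFilterCount_cons, pvFilterCount_cons]
      have hva : ¬ (a = v) := hav
      by_cases hma : m a > 0
      · have h2 : (if a = v then m v + 1 else m a) > 0 := by simp [hva]; omega
        simp only [if_pos hma, if_pos h2]
        rw [ih _ (by simp [Ne.symm hav]; omega)]
        congr 1
        funext w
        by_cases hwv : w = v <;> by_cases hwa : w = a <;>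
          simp [hwv, hwa, hva] <;> simp_all
      · have h2 : ¬ ((if a = v then m v + 1 else m a) > 0) := by simp [hva]; omega
        simp only [if_neg hma, if_neg h2]
        rw [ih _ hm]

theorem pv_erase_fold (fs : List (List Int)) (l : List (List Int)) :
    fs.foldl (fun acc it => acc.erase it) l
      = pvFilterCount l (fun v => (fs.count v : Int)) := by
  induction fs generalizing l with
  | nil =>
    simp only [List.foldl]
    rw [show (fun v : List Int => (([] : List (List Int)).count v : Int)) = (fun _ => 0) by
      funext v; simp]
    exact (pv_filterCount_zero l).symm
  | cons v fs ih =>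
    simp only [List.foldl]
    rw [ih]
    rw [pv_filterCount_erase _ _ _ (by positivity)]
    congr 1
    funext w
    by_cases hw : w = v
    · simp [hw]
    · simp [hw, Ne.symm hw]

-- A's guarded remove step is exactly List.erase
theorem pv_astep_eq_erase :
    (fun (acc : List (List Int)) (item : List Int) =>
        if item ∈ acc then (PySem.List.remove? acc item).getD acc else acc)
      = (fun acc item => acc.erase item) := by
  funext acc item
  by_cases h : item ∈ acc
  · simp [h, PySem.List.remove?_eq_some_erase acc item h]
  · simp [h, List.erase_of_not_mem h]

-- the counting fold of B
theorem pv_counts (fs : List (List Int)) (d : PySem.Dict (List Int) Int) (v : List Int) :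
    (fs.foldl (fun d item => d.insert item (d.getD item 0 + 1)) d).getD v 0
      = d.getD v 0 + (fs.count v : Int) := by
  induction fs generalizing d with
  | nil => simp
  | cons a t ih =>
    simp only [List.foldl]
    rw [ih, PySem.Dict.getD_insert, List.count_cons]
    by_cases hv : v = a
    · simp [hv]; ring
    · simp [hv, Ne.symm hv]

-- B's single pass appends pvFilterCount of the dict's counts
theorem pv_bpass (cs : List (List Int)) (nb : List (List Int)) (d : PySem.Dict (List Int) Int) :
    (cs.foldl (fun (p : List (List Int) × PySem.Dict (List Int) Int) item =>
        let c := p.2.getD item 0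
        if c > 0 then (p.1, p.2.insert item (c - 1))
        else (p.1 ++ [item], p.2)) (nb, d)).1
      = nb ++ pvFilterCount cs (fun v => d.getD v 0) := by
  induction cs generalizing nb d with
  | nil => simp [pvFilterCount]
  | cons a t ih =>
    simp only [List.foldl, pvFilterCount]
    by_cases h : d.getD a 0 > 0
    · simp only [if_pos h]
      rw [ih]
      have hfun : (fun v => (d.insert a (d.getD a 0 - 1)).getD v 0)
          = (fun v => if v = a then d.getD a 0 - 1 else d.getD v 0) := by
        funext w; rw [PySem.Dict.getD_insert]
      rw [hfun]
    · simp only [if_neg h]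
      rw [ih]
      simp

-- ===== VERDICT (by name: the statement is the Claim_ definition above) =====
theorem calculateKNegativeBoarder_spec : Claim_equal_calculateKNegativeBoarder := by
  intro nb cs fs _
  unfold Spec_calculateKNegativeBoarder calculateKNegativeBoarder calculateKNegativeBoarder_alt
  rw [pv_astep_eq_erase]
  simp only [pv_copy, List.nil_append]
  rw [pv_erase_fold, pv_bpass]
  congr 1
  congr 1
  funext v
  rw [pv_counts]
  simp
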